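-- pv_equiv track=rewrite | github.com/ribalda/adventofcode | 2023/12/step1_permutations.py | spring_valid
-- ===== SOURCE A (Python) =====
-- def spring_valid(record, perm, crc):
--     record_fixed = []
--     idx = 0
--     for r in record:
--         if r == "?":
--             r = perm[idx]
--             idx += 1
--         record_fixed += r
--     record_fixed = "".join(record_fixed)
--     new_crc = tuple(filter(lambda x: x != 0, map(len, record_fixed.split("."))))
--     return new_crc == crc
-- ===== SOURCE B (Python) =====
-- def spring_valid(record, perm, crc):
--     runs = []
--     count = 0
--     idx = 0
--     for c in record:
--         if c == "?":
--             c = perm[idx]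
--             idx += 1
--         if c == ".":
--             if count:
--                 runs.append(count)
--             count = 0
--         else:
--             count += 1
--     if count:
--         runs.append(count)
--     return tuple(runs) == crc
-- ===== Notes on version B (the rewrite author's own statement) =====
-- stated objective: simpler
-- what changed: B replaces A's build-a-char-list / join / split('.') / map(len) / filter-zeros pipeline by a single pass that resolves '?' from perm and maintains a running run length, flushing finished runs into a list.
import Mathlib
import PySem

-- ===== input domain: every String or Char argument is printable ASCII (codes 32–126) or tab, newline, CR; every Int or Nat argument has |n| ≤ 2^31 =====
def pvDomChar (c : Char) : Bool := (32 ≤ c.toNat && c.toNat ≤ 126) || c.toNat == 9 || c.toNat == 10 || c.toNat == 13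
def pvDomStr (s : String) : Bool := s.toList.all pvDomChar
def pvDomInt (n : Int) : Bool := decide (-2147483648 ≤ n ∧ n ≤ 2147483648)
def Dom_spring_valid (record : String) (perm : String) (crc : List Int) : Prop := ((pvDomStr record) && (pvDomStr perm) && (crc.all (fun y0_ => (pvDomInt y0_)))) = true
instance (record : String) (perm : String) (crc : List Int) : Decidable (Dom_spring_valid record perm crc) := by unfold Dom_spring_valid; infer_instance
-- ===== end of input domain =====

-- B replaces A's build-string / join / split('.') / map(len) / filter pipeline by a single pass
-- that maintains the current run length and the list of finished runs (objective: simpler; no speed claim).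

-- ===== PORT A =====
-- loop: build record_fixed (resolving '?' from perm at idx), threading (record_fixed, idx).
-- perm[idx] out of range = IndexError in Python; pyGet? returns none there — excluded by Pre_,
-- the .getD r fallback is never taken inside Pre_.
def spring_valid (record : String) (perm : String) (crc : List Int) : Bool :=
  let st := record.toList.foldl
    (fun (st : List Char × Int) (r : Char) =>
      if r = '?' then
        (st.1 ++ [(PySem.Chars.pyGet? perm.toList st.2).getD r], st.2 + 1)
      else
        (st.1 ++ [r], st.2))
    ([], 0)
  let record_fixed : List Char := st.1      -- "".join(record_fixed)
  let new_crc : List Int :=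
    ((PySem.Chars.splitOn record_fixed ['.']).map PySem.Chars.len).filter (fun x => x ≠ 0)
  new_crc == crc

-- ===== PORT B =====
-- single pass over record with state (runs, count, idx); same IndexError point (perm[idx]),
-- same .getD fallback, unreachable inside Pre_.
def spring_valid_alt (record : String) (perm : String) (crc : List Int) : Bool :=
  let st := record.toList.foldl
    (fun (st : List Int × Int × Int) (c : Char) =>
      let c' := if c = '?' then (PySem.Chars.pyGet? perm.toList st.2.2).getD c else c
      let idx' : Int := if c = '?' then st.2.2 + 1 else st.2.2
      if c' = '.' then
        ((if st.2.1 ≠ 0 then st.1 ++ [st.2.1] else st.1), 0, idx')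
      else
        (st.1, st.2.1 + 1, idx'))
    ([], 0, 0)
  let runs : List Int := if st.2.1 ≠ 0 then st.1 ++ [st.2.1] else st.1
  runs == crc

-- ===== PRECONDITION & SPEC =====
-- Pre_ excludes exactly the inputs where Python raises IndexError: more '?' in record than perm has characters.
def Pre_spring_valid (record : String) (perm : String) (crc : List Int) : Prop :=
  record.toList.count '?' ≤ perm.toList.length
instance (record : String) (perm : String) (crc : List Int) : Decidable (Pre_spring_valid record perm crc) := by unfold Pre_spring_valid; infer_instance

def pvWitness_spring_valid : String × String × List Int := ("#?.##?", "#.", [1, 2])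

def Spec_spring_valid (record : String) (perm : String) (crc : List Int) (out : Bool) : Prop := out = spring_valid_alt record perm crc
instance (record : String) (perm : String) (crc : List Int) (out : Bool) : Decidable (Spec_spring_valid record perm crc out) := by unfold Spec_spring_valid; infer_instance

-- ===== CLAIM (what is proved, stated in full; the proofs are below) =====
def Claim_equal_spring_valid : Prop := ∀ (record : String) (perm : String) (crc : List Int), Dom_spring_valid record perm crc → Pre_spring_valid record perm crc → Spec_spring_valid record perm crc (spring_valid record perm crc)

-- ===== LEMMAS AND PROOFS =====

-- the resolved character list (proof-side only)
def pvResolve (perm : List Char) (idx : Int) : List Char → List Char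
  | [] => []
  | c :: rest =>
    if c = '?' then
      (PySem.Chars.pyGet? perm idx).getD c :: pvResolve perm (idx + 1) rest
    else
      c :: pvResolve perm idx rest

-- simple structural recursion equivalent to splitOn on a one-char separator
def pvSplit (cur : List Char) : List Char → List (List Char)
  | [] => [cur.reverse]
  | c :: rest => if c = '.' then cur.reverse :: pvSplit [] rest else pvSplit (c :: cur) rest

-- run lengths with a pending count (proof-side only)
def pvRuns (count : Int) : List Char → List Int
  | [] => if count ≠ 0 then [count] else []
  | c :: rest => if c = '.' then (if count ≠ 0 then count :: pvRuns 0 rest else pvRuns 0 rest) else pvRuns (count + 1) rest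

theorem pvGo_eq (l : List Char) : ∀ (fuel : Nat), l.length ≤ fuel →
    ∀ (cur : List Char) (acc : List (List Char)),
    PySem.Chars.splitOn.go ['.'] fuel l cur acc = acc.reverse ++ pvSplit cur l := by
  induction l with
  | nil =>
    intro fuel _ cur acc
    cases fuel <;> simp [PySem.Chars.splitOn.go, pvSplit]
  | cons c rest ih =>
    intro fuel hf cur acc
    cases fuel with
    | zero => simp at hf
    | succ n =>
      simp at hf
      by_cases hc : c = '.'
      · have hp : List.isPrefixOf ['.'] (c :: rest) = true := by
          simp [List.isPrefixOf, hc]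
        simp [PySem.Chars.splitOn.go, pvSplit, hc, ih n hf]
      · have hp : List.isPrefixOf ['.'] (c :: rest) = false := by
          simp [List.isPrefixOf]
          intro h; exact absurd h.symm hc
        simp [PySem.Chars.splitOn.go, hp, pvSplit, hc, ih n hf]

theorem splitOn_eq (l : List Char) : PySem.Chars.splitOn l ['.'] = pvSplit [] l := by
  have := pvGo_eq l (l.length + 1) (by omega) [] []
  simpa [PySem.Chars.splitOn] using this

theorem crc_of_split (l : List Char) : ∀ (cur : List Char),
    ((pvSplit cur l).map PySem.Chars.len).filter (fun x => x ≠ 0) = pvRuns (cur.length : Int) l := by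
  induction l with
  | nil =>
    intro cur
    by_cases h : cur = []
    · simp [pvSplit, pvRuns, h, PySem.Chars.len]
    · simp [pvSplit, pvRuns, h, List.filter, PySem.Chars.len]
  | cons c rest ih =>
    intro cur
    by_cases hc : c = '.'
    · by_cases h : cur = []
      · simp [pvSplit, pvRuns, hc, h]
        simpa using ih []
      · simp [pvSplit, pvRuns, hc, h, PySem.Chars.len]
        simpa using ih []
    · have h1 : ((c :: cur).length : Int) = (cur.length : Int) + 1 := by simp
      simpa [pvSplit, pvRuns, hc, h1] using ih (c :: cur)

-- A's loop builds exactly pvResolve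
theorem foldA_eq (perm : List Char) (l : List Char) : ∀ (fixed : List Char) (idx : Int),
    (l.foldl (fun (st : List Char × Int) (r : Char) =>
      if r = '?' then (st.1 ++ [(PySem.Chars.pyGet? perm st.2).getD r], st.2 + 1)
      else (st.1 ++ [r], st.2)) (fixed, idx)).1 = fixed ++ pvResolve perm idx l := by
  induction l with
  | nil => intro fixed idx; simp [pvResolve]
  | cons c rest ih =>
    intro fixed idx
    rw [List.foldl_cons]
    by_cases hc : c = '?'
    · rw [if_pos hc, ih]
      simp [pvResolve, hc]
    · rw [if_neg hc, ih]
      simp [pvResolve, hc]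

-- B's loop computes runs ++ pvRuns count (pvResolve idx l), after the final flush
def pvFlush (st : List Int × Int × Int) : List Int := if st.2.1 ≠ 0 then st.1 ++ [st.2.1] else st.1

theorem foldB_eq (perm : List Char) (l : List Char) : ∀ (runs : List Int) (count idx : Int),
    pvFlush (l.foldl (fun (st : List Int × Int × Int) (c : Char) =>
      let c' := if c = '?' then (PySem.Chars.pyGet? perm st.2.2).getD c else c
      let idx' : Int := if c = '?' then st.2.2 + 1 else st.2.2
      if c' = '.' then ((if st.2.1 ≠ 0 then st.1 ++ [st.2.1] else st.1), 0, idx')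
      else (st.1, st.2.1 + 1, idx')) (runs, count, idx))
    = runs ++ pvRuns count (pvResolve perm idx l) := by
  induction l with
  | nil => intro runs count idx; by_cases h : count ≠ 0 <;> simp [pvFlush, pvResolve, pvRuns, h]
  | cons c rest ih =>
    intro runs count idx
    rw [List.foldl_cons]
    show pvFlush (List.foldl _
        (if (if c = '?' then (PySem.Chars.pyGet? perm idx).getD c else c) = '.'
         then ((if count ≠ 0 then runs ++ [count] else runs), 0,
               if c = '?' then idx + 1 else idx)
         else (runs, count + 1, if c = '?' then idx + 1 else idx)) rest)
      = runs ++ pvRuns count (pvResolve perm idx (c :: rest))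
    by_cases hq : c = '?'
    · subst hq
      rw [if_pos rfl]
      have hres : pvResolve perm idx ('?' :: rest)
          = (PySem.Chars.pyGet? perm idx).getD '?' :: pvResolve perm (idx + 1) rest := by
        simp [pvResolve]
      rw [hres]
      by_cases hd : (PySem.Chars.pyGet? perm idx).getD '?' = '.'
      · rw [if_pos hd]
        simp only [PySem.Chars.pyGet?_eq_listPyGet?] at hd
        by_cases h0 : count ≠ 0
        · rw [if_pos h0, ih]
          simp [pvRuns, hd, h0]
        · rw [if_neg h0, ih]
          simp [pvRuns, hd, h0]
      · rw [if_neg hd, ih]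
        simp only [PySem.Chars.pyGet?_eq_listPyGet?] at hd
        simp [pvRuns, hd]
    · rw [if_neg hq]
      have hres : pvResolve perm idx (c :: rest) = c :: pvResolve perm idx rest := by
        simp [pvResolve, hq]
      rw [hres]
      by_cases hd : c = '.'
      · rw [if_pos hd]
        by_cases h0 : count ≠ 0
        · rw [if_pos h0, ih]
          simp [pvRuns, hd, h0]
        · rw [if_neg h0, ih]
          simp [pvRuns, hd, h0]
      · rw [if_neg hd, ih]
        simp [pvRuns, hq, hd]

theorem ports_agree (record perm : String) (crc : List Int) :
    spring_valid record perm crc = spring_valid_alt record perm crc := by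
  unfold spring_valid spring_valid_alt
  have hA := foldA_eq perm.toList record.toList [] 0
  have hB := foldB_eq perm.toList record.toList [] 0 0
  simp only [List.nil_append] at hA hB
  simp only [hA]
  rw [show (if ((record.toList.foldl (fun (st : List Int × Int × Int) (c : Char) =>
      let c' := if c = '?' then (PySem.Chars.pyGet? perm.toList st.2.2).getD c else c
      let idx' : Int := if c = '?' then st.2.2 + 1 else st.2.2
      if c' = '.' then ((if st.2.1 ≠ 0 then st.1 ++ [st.2.1] else st.1), 0, idx')
      else (st.1, st.2.1 + 1, idx')) ([], 0, 0)).2.1 ≠ 0) then _ ++ [_] else _)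
      = pvRuns 0 (pvResolve perm.toList 0 record.toList) from hB]
  rw [splitOn_eq]
  rw [show ((pvSplit [] (pvResolve perm.toList 0 record.toList)).map PySem.Chars.len).filter (fun x => x ≠ 0)
      = pvRuns 0 (pvResolve perm.toList 0 record.toList) from crc_of_split _ []]

-- ===== VERDICT (by name: the statement is the Claim_ definition above) =====
theorem spring_valid_spec : Claim_equal_spring_valid := by
  intro record perm crc _ _
  unfold Spec_spring_valid
  exact ports_agree record perm crc
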